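-- pv_equiv track=rewrite | github.com/biagio-scaglia/Nintendo-AI | app/utils.py | sanitize_user_input
-- ===== SOURCE A (Python) =====
-- def sanitize_user_input(text: str) -> str:
--     """
--     Protegge l'AI da tentativi di prompt injection e manipolazione.
--     NON filtra contenuti NSFW, solo tentativi di jailbreak.
--     """
--     # Parole chiave per prompt injection e jailbreak
--     banned = [
--         "ignore previous", "change your role", "system:", "you are now",
--         "forget", "disregard", "override", "jailbreak", "dan mode",
--         "you are a", "act as", "pretend to be", "roleplay as",
--         "forget all", "ignore all", "new instructions", "new rules"
--     ]
--     lowered = text.lower()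
--
--     if any(b in lowered for b in banned):
--         return "Parlami dei giochi Nintendo che ti piacciono."
--
--     return text
-- ===== SOURCE B (Python) =====
-- _BANNED = [
--     "ignore previous", "change your role", "system:", "you are now",
--     "forget", "disregard", "override", "jailbreak", "dan mode",
--     "you are a", "act as", "pretend to be", "roleplay as",
--     "forget all", "ignore all", "new instructions", "new rules"
-- ]
-- # index the blacklist once: the set of phrase lengths, and a hash set of the phrases
-- _LENS = sorted({len(b) for b in _BANNED})
-- _SET = frozenset(_BANNED)
--
--
-- def sanitize_user_input(text: str) -> str:
--     low = text.lower()
--     for i in range(len(low)):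
--         if any(low[i:i + L] in _SET for L in _LENS):
--             return "Parlami dei giochi Nintendo che ti piacciono."
--     return text
-- ===== Notes on version B (the rewrite author's own statement) =====
-- stated objective: alternative
-- what changed: Replaced the phrase-major loop of 17 full substring scans with a position-major single pass that, at each index, looks the slice of each distinct phrase length up in a frozenset built once from the blacklist, so the per-phrase inner scan disappears.
import Mathlib
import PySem

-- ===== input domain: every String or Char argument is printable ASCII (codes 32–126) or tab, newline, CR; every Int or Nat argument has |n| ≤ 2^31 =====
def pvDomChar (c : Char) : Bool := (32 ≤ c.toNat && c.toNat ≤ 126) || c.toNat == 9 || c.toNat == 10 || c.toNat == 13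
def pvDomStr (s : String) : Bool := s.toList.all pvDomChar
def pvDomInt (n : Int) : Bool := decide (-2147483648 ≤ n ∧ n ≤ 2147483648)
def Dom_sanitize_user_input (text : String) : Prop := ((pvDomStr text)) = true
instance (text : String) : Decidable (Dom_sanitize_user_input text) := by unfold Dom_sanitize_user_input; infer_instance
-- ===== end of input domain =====

-- B replaces A's phrase-major loop (17 full substring scans of the lowered text) by a
-- position-major single pass: at each index it looks the slice of each distinct phrase
-- length up in a set built once from the blacklist; same return value.

-- ===== PORT A =====
-- the banned keyword list, as in A
def pvBannedA : List String :=
  ["ignore previous", "change your role", "system:", "you are now",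
   "forget", "disregard", "override", "jailbreak", "dan mode",
   "you are a", "act as", "pretend to be", "roleplay as",
   "forget all", "ignore all", "new instructions", "new rules"]

def sanitize_user_input (text : String) : String :=
  let lowered := PySem.Str.lower text
  if pvBannedA.any (fun b => PySem.Str.isIn b lowered) then
    "Parlami dei giochi Nintendo che ti piacciono."
  else
    text

-- ===== PORT B =====
-- _BANNED, the same literal blacklist
def pvBannedB : List String :=
  ["ignore previous", "change your role", "system:", "you are now",
   "forget", "disregard", "override", "jailbreak", "dan mode",
   "you are a", "act as", "pretend to be", "roleplay as",
   "forget all", "ignore all", "new instructions", "new rules"]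

-- _LENS = sorted({len(b) for b in _BANNED})
def pvLensB : List Nat :=
  PySem.List.sorted (PySem.Set.ofList (pvBannedB.map (fun b => b.toList.length))) (fun x => x) false

-- _SET = frozenset(_BANNED)
def pvSetB : PySem.Set String := PySem.Set.ofList pvBannedB

-- 'any(low[i:i+L] in _SET for L in _LENS)' at one position: the slice low[i:i+L] is
-- List.take L of the suffix of low starting at i (exact: 0 ≤ i ≤ i+L)
def pvPosHit (s : List Char) : Bool :=
  pvLensB.any (fun L => PySem.Set.contains pvSetB (String.ofList (s.take L)))

-- 'for i in range(len(low)): …' — recursion over the suffixes of low, exact for the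
-- positions 0 … len(low)-1 the Python visits
def pvFind : List Char → Bool
  | [] => false
  | c :: cs => pvPosHit (c :: cs) || pvFind cs

def sanitize_user_input_alt (text : String) : String :=
  let low := PySem.Str.lower text
  if pvFind low.toList then
    "Parlami dei giochi Nintendo che ti piacciono."
  else
    text

-- ===== PRECONDITION & SPEC =====
def Spec_sanitize_user_input (text : String) (out : String) : Prop := out = sanitize_user_input_alt text
instance (text : String) (out : String) : Decidable (Spec_sanitize_user_input text out) := by unfold Spec_sanitize_user_input; infer_instance

-- ===== CLAIM (what is proved, stated in full; the proofs are below) =====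
def Claim_equal_sanitize_user_input : Prop := ∀ (text : String), Dom_sanitize_user_input text → Spec_sanitize_user_input text (sanitize_user_input text)

-- ===== LEMMAS AND PROOFS =====

-- every member of the slice set is a banned phrase and conversely
lemma pvSetB_mem (b : String) : b ∈ pvSetB ↔ b ∈ pvBannedA := by
  unfold pvSetB
  rw [PySem.Set.mem_ofList]
  exact Iff.rfl

-- every banned phrase's length occurs in _LENS
lemma pvLens_complete : ∀ b ∈ pvBannedA, b.toList.length ∈ pvLensB := by decide

-- no banned phrase is empty
lemma pvBanned_ne_nil : ∀ b ∈ pvBannedA, b.toList ≠ [] := by decide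

-- one position of B's scan finds exactly the phrases that are prefixes of the suffix
lemma pvPosHit_iff (s : List Char) :
    pvPosHit s = true ↔ ∃ b ∈ pvBannedA, b.toList <+: s := by
  unfold pvPosHit
  simp only [List.any_eq_true, PySem.Set.contains_iff]
  constructor
  · rintro ⟨L, _, hmem⟩
    refine ⟨String.ofList (s.take L), (pvSetB_mem _).1 hmem, ?_⟩
    simpa using List.take_prefix L s
  · rintro ⟨b, hb, hpre⟩
    refine ⟨b.toList.length, pvLens_complete b hb, ?_⟩
    have : s.take b.toList.length = b.toList := (List.prefix_iff_eq_take.1 hpre).symm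
    rw [this]
    simpa using (pvSetB_mem b).2 hb
  
-- B's scan over all suffixes finds exactly the phrases that are infixes
lemma pvFind_iff (s : List Char) :
    pvFind s = true ↔ ∃ b ∈ pvBannedA, b.toList <:+: s := by
  induction s with
  | nil =>
    simp only [pvFind]
    constructor
    · intro h; exact absurd h (by decide)
    · rintro ⟨b, hb, hinf⟩
      exact absurd (by simpa using hinf) (pvBanned_ne_nil b hb)
  | cons c cs ih =>
    simp only [pvFind, Bool.or_eq_true, pvPosHit_iff, ih]
    constructor
    · rintro (⟨b, hb, hpre⟩ | ⟨b, hb, hinf⟩)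
      · exact ⟨b, hb, hpre.isInfix⟩
      · exact ⟨b, hb, List.infix_cons hinf⟩
    · rintro ⟨b, hb, hinf⟩
      rcases List.infix_cons_iff.1 hinf with hpre | hinf'
      · exact Or.inl ⟨b, hb, hpre⟩
      · exact Or.inr ⟨b, hb, hinf'⟩

-- the two conditions agree on every text
lemma pvCond_eq (text : String) :
    pvBannedA.any (fun b => PySem.Str.isIn b (PySem.Str.lower text)) = pvFind (PySem.Str.lower text).toList := by
  rw [Bool.eq_iff_iff]
  simp only [List.any_eq_true, PySem.Str.isIn_iff_infix, pvFind_iff]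

-- ===== VERDICT (by name: the statement is the Claim_ definition above) =====
theorem sanitize_user_input_spec : Claim_equal_sanitize_user_input := by
  intro text _
  unfold Spec_sanitize_user_input sanitize_user_input sanitize_user_input_alt
  simp only [pvCond_eq]
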